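-- pv_equiv track=rewrite | github.com/roman-sktm/algorithms | sort_materials_for_produckt.py.py | series_of_products
-- ===== SOURCE A (Python) =====
-- def series_of_products(DATA:list):
-- 	""" Return dictionary.
-- 	Keys - names of products.
-- 	Values - list. Element 0 - first series of the product.
-- 	Element 1 - last series of the product.
-- 	"""
-- 	dict_of_products = {}
-- 	for i in DATA:
-- 		# Filling the dictionary with keys (products):
-- 		if i[1] not in dict_of_products.keys():
-- 			dict_of_products[i[1]] = [i[2], i[3]]
-- 		else:
-- 			series = dict_of_products[i[1]]
-- 			if i[2] < series[0]:
-- 				series[0] = i[2]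
-- 			if i[3] > series[1]:
-- 				series[1] = i[3]
-- 	return dict_of_products
-- ===== SOURCE B (Python) =====
-- def series_of_products(DATA:list):
-- 	""" Two-phase group-then-reduce: first group the (first, last) series pairs
-- 	per product with setdefault, then reduce each group with min/max. """
-- 	groups = {}
-- 	for i in DATA:
-- 		groups.setdefault(i[1], []).append((i[2], i[3]))
-- 	result = {}
-- 	for product, pairs in groups.items():
-- 		firsts = [p[0] for p in pairs]
-- 		lasts = [p[1] for p in pairs]
-- 		result[product] = [min(firsts), max(lasts)]
-- 	return result
-- ===== Notes on version B (the rewrite author's own statement) =====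
-- stated objective: alternative
-- what changed: A streams one pass keeping a running [min,max] per product and mutating it in place; B is a two-phase group-then-reduce: it first groups all (first,last) pairs per product with setdefault, then builds the result by reducing each group with the built-in min/max.
import Mathlib
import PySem

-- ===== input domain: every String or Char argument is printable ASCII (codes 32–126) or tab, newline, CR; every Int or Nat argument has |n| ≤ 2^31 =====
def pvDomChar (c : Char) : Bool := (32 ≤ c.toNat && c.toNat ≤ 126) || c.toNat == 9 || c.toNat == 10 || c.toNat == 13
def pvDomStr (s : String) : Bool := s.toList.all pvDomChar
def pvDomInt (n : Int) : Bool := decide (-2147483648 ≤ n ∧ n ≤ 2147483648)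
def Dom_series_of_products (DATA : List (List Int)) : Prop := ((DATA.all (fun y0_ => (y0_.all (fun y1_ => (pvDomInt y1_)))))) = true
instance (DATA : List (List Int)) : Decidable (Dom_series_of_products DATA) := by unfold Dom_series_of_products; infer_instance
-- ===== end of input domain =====

-- B is a two-phase group-then-reduce (group pairs per product, then min/max each group),
-- where A keeps a running [min, max] per product in one streaming pass.

-- ===== PORT A =====
-- loop body of A's 'for i in DATA'
def sopLoopA (d : PySem.Dict Int (List Int)) (i : List Int) : PySem.Dict Int (List Int) :=
  if d.contains (PySem.List.pyGetD i 1 0) = false then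
    d.insert (PySem.List.pyGetD i 1 0) [PySem.List.pyGetD i 2 0, PySem.List.pyGetD i 3 0]
  else
    let series := d.getD (PySem.List.pyGetD i 1 0) []
    let series := if PySem.List.pyGetD i 2 0 < PySem.List.pyGetD series 0 0
                  then PySem.List.pySetD series 0 (PySem.List.pyGetD i 2 0) else series
    let series := if PySem.List.pyGetD i 3 0 > PySem.List.pyGetD series 1 0
                  then PySem.List.pySetD series 1 (PySem.List.pyGetD i 3 0) else series
    d.insert (PySem.List.pyGetD i 1 0) series

def series_of_products (DATA : List (List Int)) : List (Int × List Int) :=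
  (DATA.foldl sopLoopA PySem.Dict.empty).items

-- ===== PORT B =====
-- phase 1 loop body: groups.setdefault(i[1], []).append((i[2], i[3]))
def sopLoopB (g : PySem.Dict Int (List (Int × Int))) (i : List Int) : PySem.Dict Int (List (Int × Int)) :=
  g.modify (PySem.List.pyGetD i 1 0) [] (fun ps => ps ++ [(PySem.List.pyGetD i 2 0, PySem.List.pyGetD i 3 0)])

-- phase 2: one group → its [min(firsts), max(lasts)] entry (groups are nonempty, so the
-- defaults of min?/max? are never used)
def sopReduce (p : Int × List (Int × Int)) : Int × List Int :=
  (p.1, [(PySem.List.min? (p.2.map Prod.fst) (fun x => x)).getD 0,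
         (PySem.List.max? (p.2.map Prod.snd) (fun x => x)).getD 0])

def series_of_products_alt (DATA : List (List Int)) : List (Int × List Int) :=
  ((DATA.foldl sopLoopB PySem.Dict.empty).items).map sopReduce

-- ===== PRECONDITION & SPEC =====
-- A raises IndexError on any row with fewer than 4 elements (it reads i[1], i[2], i[3]); B raises there too.
def Pre_series_of_products (DATA : List (List Int)) : Prop := ∀ i ∈ DATA, 4 ≤ i.length
instance (DATA : List (List Int)) : Decidable (Pre_series_of_products DATA) := by unfold Pre_series_of_products; infer_instance

def pvWitness_series_of_products : List (List Int) := [[9, 1, 2, 3], [8, 1, 0, 7], [7, 2, 5, 5]]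

def Spec_series_of_products (DATA : List (List Int)) (out : List (Int × List Int)) : Prop := out = series_of_products_alt DATA
instance (DATA : List (List Int)) (out : List (Int × List Int)) : Decidable (Spec_series_of_products DATA out) := by unfold Spec_series_of_products; infer_instance

-- ===== CLAIM (what is proved, stated in full; the proofs are below) =====
def Claim_equal_series_of_products : Prop := ∀ (DATA : List (List Int)), Dom_series_of_products DATA → Pre_series_of_products DATA → Spec_series_of_products DATA (series_of_products DATA)

-- ===== LEMMAS AND PROOFS =====

-- proof-side view of B's grouping dict through phase 2
def sopRender (g : PySem.Dict Int (List (Int × Int))) : PySem.Dict Int (List Int) :=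
  PySem.Dict.mk (g.items.map sopReduce)

lemma sopMin_append (ps : List (Int × Int)) (h : ps ≠ []) (a b : Int) :
    (PySem.List.min? ((ps ++ [(a, b)]).map Prod.fst) (fun x => x)).getD 0 =
      (if a < (PySem.List.min? (ps.map Prod.fst) (fun x => x)).getD 0
       then a else (PySem.List.min? (ps.map Prod.fst) (fun x => x)).getD 0) := by
  obtain ⟨q, t, rfl⟩ := List.exists_cons_of_ne_nil h
  simp [PySem.List.min?_id_cons, List.map_cons, List.map_append, List.foldl_append, min_def]
  omega

lemma sopMax_append (ps : List (Int × Int)) (h : ps ≠ []) (a b : Int) :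
    (PySem.List.max? ((ps ++ [(a, b)]).map Prod.snd) (fun x => x)).getD 0 =
      (if b > (PySem.List.max? (ps.map Prod.snd) (fun x => x)).getD 0
       then b else (PySem.List.max? (ps.map Prod.snd) (fun x => x)).getD 0) := by
  obtain ⟨q, t, rfl⟩ := List.exists_cons_of_ne_nil h
  simp [PySem.List.max?_id_cons, List.map_cons, List.map_append, List.foldl_append, max_def]
  omega

lemma sopPred (k : Int) : ((fun (p : Int × List Int) => p.1 == k) ∘ sopReduce) =
    (fun (p : Int × List (Int × Int)) => p.1 == k) := by
  funext p; rfl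

lemma sopContains_render (g : PySem.Dict Int (List (Int × Int))) (k : Int) :
    (sopRender g).contains k = g.contains k := by
  simp only [sopRender, PySem.Dict.contains, List.any_map, sopPred]

lemma sopGet?_render (g : PySem.Dict Int (List (Int × Int))) (k : Int) :
    (sopRender g).get? k = (g.get? k).map (fun ps => (sopReduce (k, ps)).2) := by
  simp only [sopRender, PySem.Dict.get?, List.find?_map, sopPred]
  cases hf : g.items.find? (fun p => p.1 == k) with
  | none => rfl
  | some p => rfl

lemma sopSet0 (x y v : Int) : PySem.List.pySetD [x, y] 0 v = [v, y] := by
  simp [PySem.List.pySetD, PySem.List.pySet?, PySem.List.pyIdx?]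

lemma sopSet1 (x y v : Int) : PySem.List.pySetD [x, y] 1 v = [x, v] := by
  simp [PySem.List.pySetD, PySem.List.pySet?, PySem.List.pyIdx?]

lemma sopGet1 (x y : Int) : PySem.List.pyGetD [x, y] 1 0 = y := by
  simp [PySem.List.pyGetD, PySem.List.pyGet?, PySem.List.pyIdx?]

-- replacing the value at an existing key commutes with the phase-2 reduction
lemma sopInsert_render (g : PySem.Dict Int (List (Int × Int))) (k : Int)
    (ps : List (Int × Int)) (hc : g.contains k = true) (a b : Int) :
    (sopRender g).insert k (sopReduce (k, ps ++ [(a, b)])).2 =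
      sopRender (g.insert k (ps ++ [(a, b)])) := by
  have hc' : (sopRender g).contains k = true := by rw [sopContains_render]; exact hc
  apply PySem.Dict.ext
  rw [PySem.Dict.items_insert_of_contains _ _ hc']
  have h2 : (sopRender (g.insert k (ps ++ [(a, b)]))).items
      = ((g.insert k (ps ++ [(a, b)])).items).map sopReduce := rfl
  rw [h2, PySem.Dict.items_insert_of_contains _ _ hc]
  have h3 : (sopRender g).items = g.items.map sopReduce := rfl
  rw [h3, List.map_map, List.map_map]
  apply List.map_congr_left
  intro p _
  by_cases hk : p.1 = k
  · simp [Function.comp, sopReduce, hk]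
  · simp [Function.comp, sopReduce, hk]

lemma sopStep (g : PySem.Dict Int (List (Int × Int))) (i : List Int)
    (hne : ∀ p ∈ g.items, p.2 ≠ []) :
    sopLoopA (sopRender g) i = sopRender (sopLoopB g i) := by
  unfold sopLoopA sopLoopB PySem.Dict.modify
  rw [sopContains_render]
  by_cases hc : g.contains (PySem.List.pyGetD i 1 0) = true
  · -- the product is already in the dict
    obtain ⟨ps, hps⟩ : ∃ ps, g.get? (PySem.List.pyGetD i 1 0) = some ps := by
      rw [PySem.Dict.contains_eq_isSome_get?] at hc
      exact Option.isSome_iff_exists.mp hc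
    have hpsne : ps ≠ [] := hne _ (PySem.Dict.mem_items_of_get?_eq_some g hps)
    simp only [hc, Bool.true_eq_false, if_false]
    rw [PySem.Dict.getD_eq_get?_getD, PySem.Dict.getD_eq_get?_getD, sopGet?_render, hps]
    simp only [Option.map_some, Option.getD_some, sopReduce]
    rw [PySem.List.pyGetD_zero_cons]
    rw [← sopInsert_render g _ ps hc (PySem.List.pyGetD i 2 0) (PySem.List.pyGetD i 3 0)]
    congr 1
    simp only [sopReduce]
    rw [sopMin_append ps hpsne, sopMax_append ps hpsne]
    simp only [sopSet0]
    split_ifs with h1 h2 h2 <;> simp_all [sopGet1, sopSet1]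
  · -- new product: both sides append
    rw [Bool.not_eq_true] at hc
    rw [PySem.Dict.getD_of_not_contains g [] hc]
    have hc' : (sopRender g).contains (PySem.List.pyGetD i 1 0) = false := by
      rw [sopContains_render]; exact hc
    simp only [hc, List.nil_append, if_true]
    apply PySem.Dict.ext
    rw [PySem.Dict.items_insert_of_not_contains _ _ hc']
    have h2 : (sopRender (g.insert (PySem.List.pyGetD i 1 0)
        [(PySem.List.pyGetD i 2 0, PySem.List.pyGetD i 3 0)])).items
        = ((g.insert (PySem.List.pyGetD i 1 0)
            [(PySem.List.pyGetD i 2 0, PySem.List.pyGetD i 3 0)]).items).map sopReduce := rfl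
    rw [h2, PySem.Dict.items_insert_of_not_contains _ _ hc]
    simp [sopRender, sopReduce, PySem.List.min?, PySem.List.max?]

lemma sopInv (g : PySem.Dict Int (List (Int × Int))) (i : List Int)
    (hne : ∀ p ∈ g.items, p.2 ≠ []) :
    ∀ p ∈ (sopLoopB g i).items, p.2 ≠ [] := by
  intro p hp
  simp only [sopLoopB, PySem.Dict.modify, PySem.Dict.insert] at hp
  split at hp
  · simp only [List.mem_map] at hp
    obtain ⟨q, hq, rfl⟩ := hp
    split
    · simp
    · exact hne q hq
  · simp only [List.mem_append, List.mem_singleton] at hp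
    rcases hp with hp | hp
    · exact hne p hp
    · subst hp; simp

lemma sopLoop (DATA : List (List Int)) (g : PySem.Dict Int (List (Int × Int)))
    (hne : ∀ p ∈ g.items, p.2 ≠ []) :
    DATA.foldl sopLoopA (sopRender g) = sopRender (DATA.foldl sopLoopB g) := by
  induction DATA generalizing g with
  | nil => rfl
  | cons i rest ih =>
    simp only [List.foldl_cons, sopStep g i hne]
    exact ih _ (sopInv g i hne)

-- ===== VERDICT (by name: the statement is the Claim_ definition above) =====
theorem series_of_products_spec : Claim_equal_series_of_products := by
  intro DATA _ _
  unfold Spec_series_of_products series_of_products series_of_products_alt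
  have h : PySem.Dict.empty = sopRender PySem.Dict.empty := rfl
  rw [h, sopLoop DATA PySem.Dict.empty (by simp [PySem.Dict.empty])]
  rfl
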